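-- pv_equiv track=rewrite | github.com/alexandrebrt14-sys/curso-factory | scripts/legacy/convert_drafts_to_tsx.py | deduplicate_modules
-- ===== SOURCE A (Python) =====
-- def deduplicate_modules(titles_and_contents: list) -> list:
--     """Remove duplicate modules (same title), keeping the longer content."""
--     seen = {}
--     for title, content in titles_and_contents:
--         # Normalize title for comparison
--         norm_title = title.strip().lower()
--         if norm_title not in seen:
--             seen[norm_title] = (title, content)
--         else:
--             # Keep the one with more content
--             existing = seen[norm_title]
--             if len(content) > len(existing[1]):
--                 seen[norm_title] = (title, content)
--     return list(seen.values())
-- ===== SOURCE B (Python) =====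
-- def deduplicate_modules(titles_and_contents: list) -> list:
--     """Group-then-reduce: collect all pairs per normalized title, then pick
--     the first longest-content pair of each group (max is first-maximal)."""
--     groups = {}
--     for title, content in titles_and_contents:
--         groups.setdefault(title.strip().lower(), []).append((title, content))
--     return [max(items, key=lambda tc: len(tc[1])) for items in groups.values()]
-- ===== Notes on version B (the rewrite author's own statement) =====
-- stated objective: alternative
-- what changed: Replaces the single interleaved loop that tracks one running best per normalized title with a group-then-reduce decomposition: first build an ordered dict of full per-title lists, then pick each group's first longest-content pair with max(key=len).
import Mathlib
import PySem

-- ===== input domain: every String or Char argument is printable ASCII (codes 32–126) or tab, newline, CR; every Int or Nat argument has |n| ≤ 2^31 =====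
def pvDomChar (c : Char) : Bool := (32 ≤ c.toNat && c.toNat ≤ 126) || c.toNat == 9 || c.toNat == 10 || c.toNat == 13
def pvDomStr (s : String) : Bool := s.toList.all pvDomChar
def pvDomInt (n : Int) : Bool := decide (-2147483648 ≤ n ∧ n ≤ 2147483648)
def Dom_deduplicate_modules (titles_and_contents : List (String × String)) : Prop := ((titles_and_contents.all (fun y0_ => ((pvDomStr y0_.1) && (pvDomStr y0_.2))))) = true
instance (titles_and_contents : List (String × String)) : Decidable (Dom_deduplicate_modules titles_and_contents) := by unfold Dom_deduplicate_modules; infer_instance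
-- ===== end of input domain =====

-- B replaces A's single loop (one running best per normalized title) by a group-then-reduce
-- decomposition: build per-title lists first, then reduce each group with max(key=len); same cost.

-- shared helper: both Pythons write literally `title.strip().lower()`
def pvNorm (t : String) : String := PySem.Str.lower (PySem.Str.strip t)

-- ===== PORT A =====
def deduplicate_modules (titles_and_contents : List (String × String)) : List (String × String) :=
  (titles_and_contents.foldl
    (fun seen tc =>
      let norm_title := pvNorm tc.1
      if seen.contains norm_title = false then
        seen.insert norm_title tc
      else
        -- Python `seen[norm_title]`: key is present on this branch, so the getD default is never used
        let existing := seen.getD norm_title tc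
        if PySem.Str.len tc.2 > PySem.Str.len existing.2 then
          seen.insert norm_title tc
        else seen)
    PySem.Dict.empty).values

-- ===== PORT B =====
def deduplicate_modules_alt (titles_and_contents : List (String × String)) : List (String × String) :=
  let groups := titles_and_contents.foldl
    (fun d tc => d.modify (pvNorm tc.1) [] (fun l => l ++ [tc]))
    PySem.Dict.empty
  -- Python `max(items, key=…)`: each group is nonempty, so the getD default is never used
  groups.values.map (fun items =>
    (PySem.List.max? items (fun tc => PySem.Str.len tc.2)).getD ("", ""))

-- ===== PRECONDITION & SPEC =====
def Spec_deduplicate_modules (titles_and_contents : List (String × String)) (out : List (String × String)) : Prop := out = deduplicate_modules_alt titles_and_contents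
instance (titles_and_contents : List (String × String)) (out : List (String × String)) : Decidable (Spec_deduplicate_modules titles_and_contents out) := by unfold Spec_deduplicate_modules; infer_instance

-- ===== CLAIM (what is proved, stated in full; the proofs are below) =====
def Claim_equal_deduplicate_modules : Prop := ∀ (titles_and_contents : List (String × String)), Dom_deduplicate_modules titles_and_contents → Spec_deduplicate_modules titles_and_contents (deduplicate_modules titles_and_contents)

-- ===== LEMMAS AND PROOFS =====

-- the reduction B applies to a group: first pair of maximal content length
def pvPick (l : List (String × String)) : String × String :=
  (PySem.List.max? l (fun tc => PySem.Str.len tc.2)).getD ("", "")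

def pvF (p : String × List (String × String)) : String × (String × String) :=
  (p.1, pvPick p.2)

theorem pvMax?_append_singleton {α κ : Type} [LT κ] [DecidableLT κ]
    (l : List α) (x : α) (key : α → κ) :
    PySem.List.max? (l ++ [x]) key =
      match PySem.List.max? l key with
      | none => some x
      | some m => if key m < key x then some x else some m := by
  simp [PySem.List.max?, List.foldl_append]
  rfl

theorem pvPick_append (l : List (String × String)) (x m : String × String)
    (hm : PySem.List.max? l (fun tc => PySem.Str.len tc.2) = some m) :
    pvPick (l ++ [x]) =
      if PySem.Str.len m.2 < PySem.Str.len x.2 then x else m := by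
  unfold pvPick
  rw [pvMax?_append_singleton, hm]
  split_ifs with hc <;> simp [PySem.Str.len] at hc <;> simp [hc, Nat.not_lt.mpr]


theorem pvContains_eq {dA : PySem.Dict String (String × String)}
    {dB : PySem.Dict String (List (String × String))}
    (h1 : dA.items = dB.items.map pvF) (k : String) :
    dA.contains k = dB.contains k := by
  simp only [PySem.Dict.contains, h1, List.any_map]
  rfl

theorem pvGet?_eq {dA : PySem.Dict String (String × String)}
    {dB : PySem.Dict String (List (String × String))}
    (h1 : dA.items = dB.items.map pvF) (k : String) :
    dA.get? k = (dB.get? k).map pvPick := by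
  simp only [PySem.Dict.get?, h1, List.find?_map, Option.map_map]
  rfl


theorem pvStep (tc : String × String)
    (dA : PySem.Dict String (String × String))
    (dB : PySem.Dict String (List (String × String)))
    (h1 : dA.items = dB.items.map pvF)
    (h2 : ∀ p ∈ dB.items, p.2 ≠ [])
    (h3 : dB.keys.Nodup) :
    (let norm_title := pvNorm tc.1
     if dA.contains norm_title = false then dA.insert norm_title tc
     else
       let existing := dA.getD norm_title tc
       if PySem.Str.len tc.2 > PySem.Str.len existing.2 then dA.insert norm_title tc
       else dA).items =
      (dB.modify (pvNorm tc.1) [] (fun l => l ++ [tc])).items.map pvF ∧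
    (∀ p ∈ (dB.modify (pvNorm tc.1) [] (fun l => l ++ [tc])).items, p.2 ≠ []) ∧
    (dB.modify (pvNorm tc.1) [] (fun l => l ++ [tc])).keys.Nodup := by
  have hCB : dA.contains (pvNorm tc.1) = dB.contains (pvNorm tc.1) := pvContains_eq h1 _
  refine ⟨?_, ?_, PySem.Dict.nodup_keys_insert _ _ _ h3⟩
  case refine_2 =>
    intro p hp
    rcases (PySem.Dict.mem_items_insert _ _ _ _).mp hp with hpe | ⟨hp', _⟩
    · subst hpe; simp
    · exact h2 _ hp'
  simp only [PySem.Dict.modify]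
  by_cases hc : dB.contains (pvNorm tc.1) = true
  · -- existing key
    obtain ⟨l0, hl0⟩ : ∃ l0, dB.get? (pvNorm tc.1) = some l0 := by
      rw [PySem.Dict.contains_eq_isSome_get?] at hc
      cases h : dB.get? (pvNorm tc.1)
      · rw [h] at hc; simp at hc
      · exact ⟨_, rfl⟩
    have hgD : dB.getD (pvNorm tc.1) [] = l0 := PySem.Dict.getD_of_get?_eq_some _ _ hl0
    have hne : l0 ≠ [] := h2 _ (PySem.Dict.mem_items_of_get?_eq_some _ hl0)
    obtain ⟨m, hm⟩ : ∃ m, PySem.List.max? l0 (fun tc => PySem.Str.len tc.2) = some m := by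
      cases h : PySem.List.max? l0 (fun tc => PySem.Str.len tc.2)
      · exact absurd ((PySem.List.max?_eq_none_iff _ _).mp h) hne
      · exact ⟨_, rfl⟩
    have hpick : pvPick l0 = m := by simp only [pvPick, hm, Option.getD_some]
    have hgA : dA.get? (pvNorm tc.1) = some m := by
      rw [pvGet?_eq h1, hl0]; simp [hpick]
    have hgDA : dA.getD (pvNorm tc.1) tc = m := PySem.Dict.getD_of_get?_eq_some _ _ hgA
    have huniq : ∀ p ∈ dB.items, p.1 = pvNorm tc.1 → p.2 = l0 := by
      intro p hp hpk
      have hg := PySem.Dict.get?_of_mem_items dB (k := p.1) (v := p.2) hp h3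
      rw [hpk, hl0] at hg
      exact Option.some.inj hg.symm
    have hcA : dA.contains (pvNorm tc.1) = true := hCB.trans hc
    rw [hgD]
    simp only [hcA, Bool.true_eq_false, if_false, hgDA]
    rw [PySem.Dict.items_insert_of_contains _ _ hc]
    by_cases hlen : PySem.Str.len tc.2 > PySem.Str.len m.2
    · rw [if_pos hlen, PySem.Dict.items_insert_of_contains _ _ hcA, h1, List.map_map, List.map_map]
      apply List.map_congr_left
      intro p hp
      by_cases hpk : p.1 = pvNorm tc.1
      · have hp2 := huniq p hp hpk
        have hlen' : m.2.length < tc.2.length := by simpa [PySem.Str.len] using hlen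
        simp [Function.comp, pvF, hpk, hp2, pvPick_append _ _ _ hm]
        exact fun h => absurd h (by omega)
      · simp [Function.comp, pvF, hpk]
    · rw [if_neg hlen, h1, List.map_map]
      apply List.map_congr_left
      intro p hp
      by_cases hpk : p.1 = pvNorm tc.1
      · have hp2 := huniq p hp hpk
        have hlen' : tc.2.length ≤ m.2.length := by
          have := hlen; simp [PySem.Str.len] at this; omega
        simp [Function.comp, pvF, hpk, hp2, pvPick_append _ _ _ hm, hpick]
        exact fun h => absurd h (by omega)
      · simp [Function.comp, pvF, hpk]
  · -- fresh key
    have hc' : dB.contains (pvNorm tc.1) = false := by simpa using hc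
    have hcA : dA.contains (pvNorm tc.1) = false := hCB.trans hc'
    have hgD : dB.getD (pvNorm tc.1) [] = [] := PySem.Dict.getD_of_not_contains _ _ hc'
    simp only [hcA, if_true]
    rw [hgD, PySem.Dict.items_insert_of_not_contains _ _ hcA,
        PySem.Dict.items_insert_of_not_contains _ _ hc', h1, List.map_append]
    simp [pvF, pvPick, PySem.List.max?]


-- invariant step: A's dict items are the pvF-image of B's dict items
theorem pvInv (l : List (String × String))
    (dA : PySem.Dict String (String × String))
    (dB : PySem.Dict String (List (String × String)))
    (h1 : dA.items = dB.items.map pvF)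
    (h2 : ∀ p ∈ dB.items, p.2 ≠ [])
    (h3 : dB.keys.Nodup) :
    (l.foldl
      (fun seen tc =>
        let norm_title := pvNorm tc.1
        if seen.contains norm_title = false then
          seen.insert norm_title tc
        else
          let existing := seen.getD norm_title tc
          if PySem.Str.len tc.2 > PySem.Str.len existing.2 then
            seen.insert norm_title tc
          else seen) dA).items =
    ((l.foldl (fun d tc => d.modify (pvNorm tc.1) [] (fun l => l ++ [tc])) dB).items).map pvF := by
  induction l generalizing dA dB with
  | nil => simpa using h1
  | cons tc rest ih =>
    simp only [List.foldl_cons]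
    obtain ⟨n1, n2, n3⟩ := pvStep tc dA dB h1 h2 h3
    exact ih _ _ n1 n2 n3

theorem deduplicate_modules_spec : Claim_equal_deduplicate_modules := by
  intro xs _
  unfold Spec_deduplicate_modules deduplicate_modules deduplicate_modules_alt
  have h := pvInv xs PySem.Dict.empty PySem.Dict.empty (by rfl) (by simp [PySem.Dict.empty]) (by simp [PySem.Dict.keys, PySem.Dict.empty])
  simp only [PySem.Dict.values, h, List.map_map]
  rfl
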